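-- pv_equiv track=rewrite | github.com/ejvlf/adventofcode2021 | day4/day4.py | parse_source_file
-- ===== SOURCE A (Python) =====
-- def parse_source_file(source: list):
--
--     withdrawn_numbers = []
--     card_number_list = []
--     current_card = []
--
--     withdrawn_numbers = source[0]
--
--     for row in source[2:]:
--
--         if row == "":
--             card_number_list.append(current_card)
--             current_card = []
--             continue
--
--         current_card.append(row.split(" "))
--
--     return withdrawn_numbers, card_number_list
-- ===== SOURCE B (Python) =====
-- def parse_source_file(source: list):
--     # Recursive decomposition: repeatedly cut the rows at the first blank line;
--     # each segment before a blank becomes one card, rows after the last blank are dropped.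
--     def cards(rows):
--         try:
--             k = rows.index("")
--         except ValueError:
--             return []
--         return [[r.split(" ") for r in rows[:k]]] + cards(rows[k + 1:])
--     return source[0], cards(source[2:])
-- ===== Notes on version B (the rewrite author's own statement) =====
-- stated objective: alternative
-- what changed: Replaced A's single pass carrying a mutable current-card accumulator with a recursive decomposition that repeatedly cuts the row list at the first blank line (list.index + slices), emitting one card per blank and naturally dropping trailing rows.
import Mathlib
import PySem

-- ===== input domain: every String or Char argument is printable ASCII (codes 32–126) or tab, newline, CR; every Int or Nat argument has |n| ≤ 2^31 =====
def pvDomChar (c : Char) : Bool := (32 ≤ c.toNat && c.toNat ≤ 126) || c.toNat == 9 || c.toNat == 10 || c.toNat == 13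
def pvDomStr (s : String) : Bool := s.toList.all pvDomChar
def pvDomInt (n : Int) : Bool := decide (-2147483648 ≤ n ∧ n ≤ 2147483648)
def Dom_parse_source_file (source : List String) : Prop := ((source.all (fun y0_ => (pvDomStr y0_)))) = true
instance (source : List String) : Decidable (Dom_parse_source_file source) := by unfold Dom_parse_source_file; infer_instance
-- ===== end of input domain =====

-- B replaces A's one-pass loop with a mutable current-card accumulator by a recursive
-- cut-at-first-blank decomposition (list.index + slices); objective: alternative, same cost.

-- ===== PORT A =====
def parse_source_file (source : List String) : String × List (List (List String)) :=
  let withdrawn_numbers := PySem.List.pyGetD source 0 ""   -- source[0]; Pre_ requires source ≠ []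
  let st := (PySem.List.slice source (some 2) none).foldl
    (fun (acc : List (List (List String)) × List (List String)) row =>
      if row = "" then (acc.1 ++ [acc.2], [])
      else (acc.1, acc.2 ++ [(PySem.Str.split? row " ").getD []]))
    ([], [])
  (withdrawn_numbers, st.1)

-- ===== PORT B =====
-- cards(rows) of Source B: cut at the first blank line, recurse on the rows after it.
def pvCardsB : List String → List (List (List String)) := fun rows =>
  match h : PySem.List.index? rows "" with
  | none => []
  | some k =>
      [(PySem.List.slice rows none (some (k : Int))).map (fun r => (PySem.Str.split? r " ").getD [])]
        ++ pvCardsB (PySem.List.slice rows (some ((k : Int) + 1)) none)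
termination_by rows => rows.length
decreasing_by
  obtain ⟨hk, -, -⟩ := PySem.List.getElem_of_index?_eq_some h
  have h1 : (k : Int) + 1 = ((k + 1 : Nat) : Int) := by push_cast; ring
  rw [h1, PySem.List.slice_from_natCast, List.length_drop]
  omega

def parse_source_file_alt (source : List String) : String × List (List (List String)) :=
  (PySem.List.pyGetD source 0 "", pvCardsB (PySem.List.slice source (some 2) none))

-- ===== PRECONDITION & SPEC =====
-- Pre_ excludes only the empty list, on which Python A raises IndexError at source[0] (B raises there too).
def Pre_parse_source_file (source : List String) : Prop := source ≠ []
instance (source : List String) : Decidable (Pre_parse_source_file source) := by unfold Pre_parse_source_file; infer_instance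
def pvWitness_parse_source_file : List String := ["7,4,9", "", "1 2", "3 4", "", "5 6"]

def Spec_parse_source_file (source : List String) (out : String × List (List (List String))) : Prop := out = parse_source_file_alt source
instance (source : List String) (out : String × List (List (List String))) : Decidable (Spec_parse_source_file source out) := by unfold Spec_parse_source_file; infer_instance

-- ===== CLAIM (what is proved, stated in full; the proofs are below) =====
def Claim_equal_parse_source_file : Prop := ∀ (source : List String), Dom_parse_source_file source → Pre_parse_source_file source → Spec_parse_source_file source (parse_source_file source)

-- ===== LEMMAS AND PROOFS =====

-- One-step characterisation of pvCardsB, with the slices rewritten to take/drop and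
-- a prefix `cur` of the first card made explicit.
def pvStepB (cur : List (List String)) (rows : List String) : List (List (List String)) :=
  match PySem.List.index? rows "" with
  | none => []
  | some k =>
      (cur ++ (rows.take k).map (fun r => (PySem.Str.split? r " ").getD []))
        :: pvCardsB (rows.drop (k + 1))

lemma pvCardsB_eq_step (rows : List String) : pvCardsB rows = pvStepB [] rows := by
  rw [pvCardsB, pvStepB]
  cases h : PySem.List.index? rows "" with
  | none => rfl
  | some k =>
      have h1 : (k : Int) + 1 = ((k + 1 : Nat) : Int) := by push_cast; ring
      simp only [h1, PySem.List.slice_from_natCast, PySem.List.slice_to_natCast]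
      simp

lemma pvStepB_cons_ne (r : String) (rs : List String) (cur : List (List String)) (hr : r ≠ "") :
    pvStepB cur (r :: rs) = pvStepB (cur ++ [(PySem.Str.split? r " ").getD []]) rs := by
  rw [pvStepB, pvStepB, PySem.List.index?_cons_of_ne rs hr]
  cases h : PySem.List.index? rs "" with
  | none => simp
  | some k => simp

-- A's loop, started from any (cards, cur), lands on cards ++ pvStepB cur rows.
lemma pvLoop_eq_step (rows : List String) :
    ∀ (cards : List (List (List String))) (cur : List (List String)),
    (rows.foldl
      (fun (acc : List (List (List String)) × List (List String)) row =>
        if row = "" then (acc.1 ++ [acc.2], [])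
        else (acc.1, acc.2 ++ [(PySem.Str.split? row " ").getD []]))
      (cards, cur)).1 = cards ++ pvStepB cur rows := by
  induction rows with
  | nil => intro cards cur; simp [pvStepB]
  | cons r rs ih =>
      intro cards cur
      by_cases hr : r = ""
      · subst hr
        have hstep : pvStepB cur ("" :: rs) = cur :: pvCardsB rs := by
          rw [pvStepB, PySem.List.index?_cons_self]
          simp
        rw [List.foldl_cons, if_pos rfl, ih, ← pvCardsB_eq_step, hstep]
        simp
      · rw [List.foldl_cons, if_neg hr, ih, pvStepB_cons_ne r rs cur hr]

-- ===== VERDICT (by name: the statement is the Claim_ definition above) =====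
theorem parse_source_file_spec : Claim_equal_parse_source_file := by
  intro source _ _
  unfold Spec_parse_source_file parse_source_file parse_source_file_alt
  simp only []
  rw [pvLoop_eq_step, pvCardsB_eq_step]
  simp
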